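-- pv_equiv track=rewrite | github.com/mzapotoczny/dependency-parser | lvsr/parser.py | chop_word
-- ===== SOURCE A (Python) =====
-- def chop_word(word, all_pieces=[]):
--     pieces = []
--     word_postfix = word
--     while word_postfix != "":
--         found = False
--         for piece in all_pieces:
--             if word_postfix.startswith(piece):
--                 pieces += [piece]
--                 word_postfix = word_postfix[len(piece):]
--                 found = True
--                 break
--         if not found:
--             pieces += word_postfix[:1]
--             word_postfix = word_postfix[1:]
--     assert u''.join(pieces) == word, u"Pieces {} do not equal word {}".format(str(pieces), word)
--     return pieces
-- ===== SOURCE B (Python) =====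
-- def chop_word(word, all_pieces=[]):
--     # Bucket the (non-empty) pieces by first character once, then walk the word
--     # by index, probing only the bucket of the current character.
--     buckets = {}
--     for p in all_pieces:
--         if p:
--             buckets[p[0]] = buckets.get(p[0], []) + [p]
--     pieces = []
--     i = 0
--     n = len(word)
--     while i < n:
--         for p in buckets.get(word[i], []):
--             if word.startswith(p, i):
--                 pieces.append(p)
--                 i += len(p)
--                 break
--         else:
--             pieces.append(word[i])
--             i += 1
--     return pieces
-- ===== Notes on version B (the rewrite author's own statement) =====
-- stated objective: faster
-- what changed: Instead of rescanning the whole piece list with string slicing at every position, B buckets the non-empty pieces by their first character in one preprocessing pass and then walks the word by index, probing only the (order-preserving) bucket of the current character with an offset startswith.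
-- outside the precondition, e.g. on chop_word('aaa', ['a', '']): A returns ['a', 'a', 'a'], B returns ['a', 'a', 'a']
import Mathlib
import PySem

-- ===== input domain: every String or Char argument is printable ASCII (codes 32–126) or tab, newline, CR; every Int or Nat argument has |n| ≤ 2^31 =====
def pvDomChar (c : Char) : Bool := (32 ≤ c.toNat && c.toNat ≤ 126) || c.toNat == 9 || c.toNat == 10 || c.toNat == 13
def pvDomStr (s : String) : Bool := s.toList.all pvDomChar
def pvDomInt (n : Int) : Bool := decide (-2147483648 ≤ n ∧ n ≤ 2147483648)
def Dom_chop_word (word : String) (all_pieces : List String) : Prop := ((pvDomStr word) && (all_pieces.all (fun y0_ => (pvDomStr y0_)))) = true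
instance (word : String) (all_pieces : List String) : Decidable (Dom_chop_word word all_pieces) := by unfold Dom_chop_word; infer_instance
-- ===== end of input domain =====

-- B buckets the non-empty pieces by first character once and walks the word by index,
-- probing only the current character's bucket (constant-factor speed-up; return value only).


-- ===== PORT A =====
-- The while loop becomes fuel recursion: every iteration of a terminating run of the
-- Python loop consumes at least one character, so fuel = len(word)+1 is enough on every
-- input on which A returns.  word_postfix[len(piece):], [:1], [1:] are drop/take (exact
-- for these nonnegative bounds); the final assert always holds when the loop exits.
def chopA_go (allp : List (List Char)) : List (List Char) → List Char → Nat → List (List Char)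
  | pieces, _, 0 => pieces
  | pieces, wp, fuel+1 =>
    if wp = [] then pieces
    else
      match allp.find? (fun piece => PySem.Chars.startswith wp piece) with
      | some piece => chopA_go allp (pieces ++ [piece]) (wp.drop piece.length) fuel
      | none => chopA_go allp (pieces ++ [wp.take 1]) (wp.drop 1) fuel

def chop_word (word : String) (all_pieces : List String) : List String :=
  (chopA_go (all_pieces.map String.toList) [] word.toList (word.toList.length + 1)).map String.ofList

-- ===== PORT B =====
-- buckets[p[0]] = buckets.get(p[0], []) + [p]  is  Dict.modify p[0] [] (· ++ [p]);
-- p[0] of a non-empty p is p.headD ' '.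
def mkBuckets (allp : List (List Char)) : PySem.Dict Char (List (List Char)) :=
  allp.foldl (fun d p => if p.isEmpty then d else d.modify (p.headD ' ') [] (· ++ [p])) PySem.Dict.empty

-- Source B's while loop over the index i, as fuel recursion (same bound as A's loop);
-- word.startswith(p, i) with 0 ≤ i ≤ len(word) is exactly startswith (word.drop i) p.
def chopB_go (word : List Char) (buckets : PySem.Dict Char (List (List Char))) :
    List (List Char) → Nat → Nat → List (List Char)
  | pieces, _, 0 => pieces
  | pieces, i, fuel+1 =>
    if h : i < word.length then
      match (buckets.getD word[i] []).find? (fun p => PySem.Chars.startswith (word.drop i) p) with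
      | some p => chopB_go word buckets (pieces ++ [p]) (i + p.length) fuel
      | none => chopB_go word buckets (pieces ++ [[word[i]]]) (i + 1) fuel
    else pieces

def chop_word_alt (word : String) (all_pieces : List String) : List String :=
  (chopB_go word.toList (mkBuckets (all_pieces.map String.toList)) [] 0 (word.toList.length + 1)).map String.ofList

-- ===== PRECONDITION & SPEC =====
-- Pre_ excludes piece lists containing the empty string together with a non-empty word:
-- there the empty piece can be matched without consuming anything and Python A loops
-- forever (it returns on some such inputs where an earlier piece always matches first —
-- see the cite in claim.json; B simply skips empty pieces).
def Pre_chop_word (word : String) (all_pieces : List String) : Prop :=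
  word = "" ∨ "" ∉ all_pieces
instance (word : String) (all_pieces : List String) : Decidable (Pre_chop_word word all_pieces) := by unfold Pre_chop_word; infer_instance

def pvWitness_chop_word : String × List String := ("unhappily", ["un", "happy", "happ", "ily", "y"])

def Spec_chop_word (word : String) (all_pieces : List String) (out : List String) : Prop := out = chop_word_alt word all_pieces
instance (word : String) (all_pieces : List String) (out : List String) : Decidable (Spec_chop_word word all_pieces out) := by unfold Spec_chop_word; infer_instance

-- ===== CLAIM (what is proved, stated in full; the proofs are below) =====
def Claim_equal_chop_word : Prop := ∀ (word : String) (all_pieces : List String), Dom_chop_word word all_pieces → Pre_chop_word word all_pieces → Spec_chop_word word all_pieces (chop_word word all_pieces)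

-- ===== LEMMAS AND PROOFS =====

-- a foldl that skips elements failing g is a foldl over the filtered list
theorem foldl_if_skip {α δ : Type} (f : δ → α → δ) (g : α → Bool) (l : List α) (d : δ) :
    l.foldl (fun d x => if g x then f d x else d) d = (l.filter g).foldl f d := by
  induction l generalizing d with
  | nil => rfl
  | cons x t ih =>
    by_cases hx : g x = true <;> simp [hx, ih]

-- the bucket of c holds exactly the non-empty pieces whose first character is c, in order
theorem getD_mkBuckets (allp : List (List Char)) (c : Char) :
    (mkBuckets allp).getD c [] = allp.filter (fun p => !p.isEmpty && (p.headD ' ' == c)) := by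
  unfold mkBuckets
  rw [show (fun (d : PySem.Dict Char (List (List Char))) (p : List Char) =>
        if p.isEmpty then d else d.modify (p.headD ' ') [] (· ++ [p]))
      = (fun d p => if !p.isEmpty then d.modify (p.headD ' ') [] (· ++ [p]) else d) by
    funext d p; by_cases hp : p.isEmpty <;> simp [hp]]
  rw [foldl_if_skip]
  have hmap : (allp.filter (fun p => !p.isEmpty)).foldl
      (fun d p => d.modify (p.headD ' ') [] (· ++ [p])) PySem.Dict.empty
      = ((allp.filter (fun p => !p.isEmpty)).map (fun p => (p.headD ' ', p))).foldl
        (fun d q => d.modify q.1 [] (· ++ [q.2])) PySem.Dict.empty := by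
    rw [List.foldl_map]
  rw [hmap, PySem.Dict.getD_foldl_modify_append, PySem.Dict.getD_empty, List.nil_append,
      List.filter_map, List.map_map]
  rw [show ((fun x : Char × List Char => x.2) ∘ fun p : List Char => (p.headD ' ', p)) = id from rfl,
      List.map_id, List.filter_filter]
  congr 1
  funext p
  simp [Function.comp, Bool.and_comm]

-- scanning the bucket of wp's first character finds the same first match as scanning all pieces
theorem find?_bucket (wp : List Char) (hwp : wp ≠ []) (allp : List (List Char)) (h0 : [] ∉ allp) :
    allp.find? (fun p => PySem.Chars.startswith wp p)
      = ((mkBuckets allp).getD (wp.headD ' ') []).find? (fun p => PySem.Chars.startswith wp p) := by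
  rw [getD_mkBuckets]
  obtain ⟨c, rest, rfl⟩ : ∃ c rest, wp = c :: rest := by
    cases wp with
    | nil => exact absurd rfl hwp
    | cons c rest => exact ⟨c, rest, rfl⟩
  induction allp with
  | nil => rfl
  | cons q t ih =>
    have hq : q ≠ [] := fun h => h0 (h ▸ List.mem_cons_self ..)
    have ht : [] ∉ t := fun h => h0 (List.mem_cons_of_mem _ h)
    obtain ⟨a, q', rfl⟩ : ∃ a q', q = a :: q' := by
      cases q with
      | nil => exact absurd rfl hq
      | cons a q' => exact ⟨a, q', rfl⟩
    by_cases ha : a = c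
    · subst ha
      by_cases hpre : PySem.Chars.startswith (a :: rest) (a :: q') = true
      · simp [hpre]
      · simp only [Bool.not_eq_true] at hpre
        simp [hpre, ih ht]
    · have hpre : PySem.Chars.startswith (c :: rest) (a :: q') = false := by
        simp [PySem.Chars.startswith, List.isPrefixOf, ha]
      simp [hpre, ha, ih ht]

-- the two loops agree step for step
theorem go_eq (allp : List (List Char)) (h0 : [] ∉ allp) (word : List Char) :
    ∀ (fuel i : Nat) (acc : List (List Char)), word.length - i < fuel →
      chopA_go allp acc (word.drop i) fuel = chopB_go word (mkBuckets allp) acc i fuel := by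
  intro fuel
  induction fuel with
  | zero => intro i acc h; omega
  | succ fuel ih =>
    intro i acc _
    by_cases hi : i < word.length
    · have hwp : word.drop i ≠ [] := by
        simp [List.drop_eq_nil_iff]; omega
      have hhead : (word.drop i).headD ' ' = word[i] := by
        rw [List.drop_eq_getElem_cons hi]; rfl
      have hfb := find?_bucket (word.drop i) hwp allp h0
      rw [hhead] at hfb
      rw [chopA_go, if_neg hwp, chopB_go, dif_pos hi, ← hfb]
      cases hfind : allp.find? (fun p => PySem.Chars.startswith (word.drop i) p) with
      | some p =>
        have hp : p ∈ allp := List.mem_of_find?_eq_some hfind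
        have hne : p ≠ [] := fun h => h0 (h ▸ hp)
        have hlen : 1 ≤ p.length := by
          cases p with
          | nil => exact absurd rfl hne
          | cons _ _ => simp
        dsimp only
        rw [List.drop_drop]
        exact ih (i + p.length) (acc ++ [p]) (by omega)
      | none =>
        have htake : (word.drop i).take 1 = [word[i]] := by
          rw [List.drop_eq_getElem_cons hi]; rfl
        dsimp only
        rw [htake, List.drop_drop]
        exact ih (i + 1) (acc ++ [[word[i]]]) (by omega)
    · have hwp : word.drop i = [] := by
        simp [List.drop_eq_nil_iff]; omega
      rw [chopA_go, if_pos hwp, chopB_go, dif_neg hi]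

-- ===== VERDICT (by name: the statement is the Claim_ definition above) =====
theorem chop_word_spec : Claim_equal_chop_word := by
  intro word all_pieces _ hpre
  unfold Spec_chop_word chop_word chop_word_alt
  rcases hpre with hw | hne
  · subst hw
    simp [chopA_go, chopB_go, String.toList_empty]
  · have h0 : [] ∉ all_pieces.map String.toList := by
      intro h
      rcases List.mem_map.mp h with ⟨s, hs, hsl⟩
      have hs0 : s = "" := String.toList_inj.mp (hsl.trans String.toList_empty.symm)
      exact hne (hs0 ▸ hs)
    have := go_eq (all_pieces.map String.toList) h0 word.toList
      (word.toList.length + 1) 0 [] (by omega)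
    rw [List.drop_zero] at this
    rw [this]
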